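-- pv_equiv track=rewrite | github.com/dxaginfo/EnvironmentTagger-Media-Tool | environment_tagger.py | _generate_environment_summary
-- ===== SOURCE A (Python) =====
-- from typing import Dict, List, Any, Optional
--
-- def _generate_environment_summary(tags: List[Dict[str, Any]],
--                                 gemini_summary: str) -> str:
--     """Generate a natural language summary of the environment.
--
--     Args:
--         tags: List of environment tags
--         gemini_summary: Summary from Gemini if available
--
--     Returns:
--         Natural language summary of the environment
--     """
--     # If Gemini provided a good summary, use it
--     if gemini_summary and len(gemini_summary) > 20:
--         return gemini_summary
--
--     # Otherwise, generate a summary from the tags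
--     location_tags = [tag['tag'] for tag in tags if tag.get('category') == 'location']
--     lighting_tags = [tag['tag'] for tag in tags if tag.get('category') == 'lighting']
--     weather_tags = [tag['tag'] for tag in tags if tag.get('category') == 'weather']
--     time_tags = [tag['tag'] for tag in tags if tag.get('category') == 'time-of-day']
--
--     summary_parts = []
--
--     if location_tags:
--         summary_parts.append(f"This is a {', '.join(location_tags[:2])} environment")
--
--     if lighting_tags:
--         summary_parts.append(f"with {', '.join(lighting_tags[:2])} lighting")
--
--     if weather_tags:
--         summary_parts.append(f"during {', '.join(weather_tags[:2])} weather conditions")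
--
--     if time_tags:
--         summary_parts.append(f"during {', '.join(time_tags[:1])}")
--
--     if not summary_parts:
--         # Fallback to general tags if no categorized tags available
--         general_tags = [tag['tag'] for tag in tags[:3]]
--         summary = f"Environment containing {', '.join(general_tags)}"
--     else:
--         summary = ". ".join(summary_parts) + "."
--
--     return summary
-- ===== SOURCE B (Python) =====
-- def _generate_environment_summary(tags, gemini_summary):
--     """One grouping pass over tags instead of four per-category scans."""
--     if gemini_summary and len(gemini_summary) > 20:
--         return gemini_summary
--
--     by_category = {'location': [], 'lighting': [], 'weather': [], 'time-of-day': []}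
--     for tag in tags:
--         c = tag.get('category')
--         if c in by_category:
--             by_category[c].append(tag['tag'])
--
--     loc = by_category['location']
--     lig = by_category['lighting']
--     wea = by_category['weather']
--     tod = by_category['time-of-day']
--
--     parts = (
--         (["This is a " + ", ".join(loc[:2]) + " environment"] if loc else []) +
--         (["with " + ", ".join(lig[:2]) + " lighting"] if lig else []) +
--         (["during " + ", ".join(wea[:2]) + " weather conditions"] if wea else []) +
--         (["during " + ", ".join(tod[:1])] if tod else [])
--     )
--
--     if parts:
--         return ". ".join(parts) + "."
--     return "Environment containing " + ", ".join(tag['tag'] for tag in tags[:3])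
-- ===== Notes on version B (the rewrite author's own statement) =====
-- stated objective: alternative
-- what changed: Replaces A's four separate per-category list-comprehension scans of tags with a single grouping pass that appends each recognized tag into a category->list dict, then reads the four lists out.
import Mathlib
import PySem

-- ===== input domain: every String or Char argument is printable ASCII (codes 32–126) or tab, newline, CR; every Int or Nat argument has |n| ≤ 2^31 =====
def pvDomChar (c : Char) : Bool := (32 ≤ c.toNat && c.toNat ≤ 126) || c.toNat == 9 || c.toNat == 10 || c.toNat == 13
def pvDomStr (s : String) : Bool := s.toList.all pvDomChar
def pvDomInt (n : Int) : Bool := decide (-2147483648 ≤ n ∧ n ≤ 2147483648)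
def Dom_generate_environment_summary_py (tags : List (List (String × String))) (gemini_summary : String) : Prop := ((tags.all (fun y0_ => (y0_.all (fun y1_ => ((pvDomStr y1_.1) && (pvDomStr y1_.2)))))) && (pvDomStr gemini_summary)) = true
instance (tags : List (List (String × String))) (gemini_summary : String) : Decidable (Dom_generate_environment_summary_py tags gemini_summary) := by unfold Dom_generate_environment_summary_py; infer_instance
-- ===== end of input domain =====

-- B replaces A's four per-category scans of tags by one grouping pass into a dict; objective: alternative (single data-structure pass).


-- ===== PORT A =====
-- one comprehension '[tag['tag'] for tag in tags if tag.get('category') == c]' (A has four instances of it)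
def pvCatTags (tags : List (List (String × String))) (c : String) : List String :=
  (tags.filter (fun t => List.lookup "category" t == some c)).map
    (fun t => (List.lookup "tag" t).getD "")

def generate_environment_summary_py (tags : List (List (String × String))) (gemini_summary : String) : String :=
  if gemini_summary != "" && decide (20 < PySem.Str.len gemini_summary) then gemini_summary
  else
    let location_tags := pvCatTags tags "location"
    let lighting_tags := pvCatTags tags "lighting"
    let weather_tags := pvCatTags tags "weather"
    let time_tags := pvCatTags tags "time-of-day"
    let summary_parts : List String := []
    let summary_parts := if location_tags != [] then summary_parts ++ ["This is a " ++ PySem.Str.join ", " (location_tags.take 2) ++ " environment"] else summary_parts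
    let summary_parts := if lighting_tags != [] then summary_parts ++ ["with " ++ PySem.Str.join ", " (lighting_tags.take 2) ++ " lighting"] else summary_parts
    let summary_parts := if weather_tags != [] then summary_parts ++ ["during " ++ PySem.Str.join ", " (weather_tags.take 2) ++ " weather conditions"] else summary_parts
    let summary_parts := if time_tags != [] then summary_parts ++ ["during " ++ PySem.Str.join ", " (time_tags.take 1)] else summary_parts
    if summary_parts == [] then
      "Environment containing " ++ PySem.Str.join ", " ((tags.take 3).map (fun t => (List.lookup "tag" t).getD ""))
    else
      PySem.Str.join ". " summary_parts ++ "."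

-- ===== PORT B =====
def pvInitCats : PySem.Dict String (List String) :=
  PySem.Dict.ofList [("location", []), ("lighting", []), ("weather", []), ("time-of-day", [])]

def pvGroupStep (d : PySem.Dict String (List String)) (t : List (String × String)) : PySem.Dict String (List String) :=
  match List.lookup "category" t with
  | some c => if d.contains c then d.modify c [] (fun l => l ++ [(List.lookup "tag" t).getD ""]) else d
  | none => d

def generate_environment_summary_py_alt (tags : List (List (String × String))) (gemini_summary : String) : String :=
  if gemini_summary != "" && decide (20 < PySem.Str.len gemini_summary) then gemini_summary
  else
    let by_category := tags.foldl pvGroupStep pvInitCats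
    let loc := by_category.getD "location" []
    let lig := by_category.getD "lighting" []
    let wea := by_category.getD "weather" []
    let tod := by_category.getD "time-of-day" []
    let parts : List String :=
      (if loc != [] then ["This is a " ++ PySem.Str.join ", " (loc.take 2) ++ " environment"] else []) ++
      (if lig != [] then ["with " ++ PySem.Str.join ", " (lig.take 2) ++ " lighting"] else []) ++
      (if wea != [] then ["during " ++ PySem.Str.join ", " (wea.take 2) ++ " weather conditions"] else []) ++
      (if tod != [] then ["during " ++ PySem.Str.join ", " (tod.take 1)] else [])
    if parts != [] then
      PySem.Str.join ". " parts ++ "."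
    else
      "Environment containing " ++ PySem.Str.join ", " ((tags.take 3).map (fun t => (List.lookup "tag" t).getD ""))

-- ===== PRECONDITION & SPEC =====
-- Pre_ excludes exactly the inputs where Python A raises KeyError: a tag with a recognized
-- category but no 'tag' key, or (when no tag has a recognized category) one of the first
-- three tags lacking a 'tag' key — unless the gemini summary short-circuits.
def Pre_generate_environment_summary_py (tags : List (List (String × String))) (gemini_summary : String) : Prop :=
  (gemini_summary ≠ "" ∧ 20 < PySem.Str.len gemini_summary) ∨
  ((∀ t ∈ tags, (∃ c ∈ (["location", "lighting", "weather", "time-of-day"] : List String),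
      List.lookup "category" t = some c) → (List.lookup "tag" t).isSome = true) ∧
   ((∃ t ∈ tags, ∃ c ∈ (["location", "lighting", "weather", "time-of-day"] : List String),
      List.lookup "category" t = some c) ∨
    (∀ t ∈ tags.take 3, (List.lookup "tag" t).isSome = true)))

instance (tags : List (List (String × String))) (gemini_summary : String) : Decidable (Pre_generate_environment_summary_py tags gemini_summary) := by unfold Pre_generate_environment_summary_py; infer_instance

def pvWitness_generate_environment_summary_py : (List (List (String × String))) × String :=
  ([[("category", "location"), ("tag", "beach")], [("category", "lighting"), ("tag", "dim")]], "")

def Spec_generate_environment_summary_py (tags : List (List (String × String))) (gemini_summary : String) (out : String) : Prop := out = generate_environment_summary_py_alt tags gemini_summary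
instance (tags : List (List (String × String))) (gemini_summary : String) (out : String) : Decidable (Spec_generate_environment_summary_py tags gemini_summary out) := by unfold Spec_generate_environment_summary_py; infer_instance

-- ===== CLAIM (what is proved, stated in full; the proofs are below) =====
def Claim_equal_generate_environment_summary_py : Prop := ∀ (tags : List (List (String × String))) (gemini_summary : String), Dom_generate_environment_summary_py tags gemini_summary → Pre_generate_environment_summary_py tags gemini_summary → Spec_generate_environment_summary_py tags gemini_summary (generate_environment_summary_py tags gemini_summary)

-- ===== LEMMAS AND PROOFS =====

lemma pv_group_getD (c : String) (tags : List (List (String × String))) :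
    ∀ d : PySem.Dict String (List String), d.contains c = true →
      (∀ k, d.contains k = pvInitCats.contains k) →
      (tags.foldl pvGroupStep d).getD c [] = d.getD c [] ++ pvCatTags tags c := by
  induction tags with
  | nil => intro d _ _; simp [pvCatTags]
  | cons t ts ih =>
    intro d hc hinv
    simp only [List.foldl_cons]
    cases h : List.lookup "category" t with
    | none =>
      simp only [pvGroupStep, h]
      rw [ih d hc hinv]
      simp [pvCatTags, h]
    | some c' =>
      by_cases hc' : d.contains c' = true
      · have hstep : pvGroupStep d t
            = d.modify c' [] (fun l => l ++ [(List.lookup "tag" t).getD ""]) := by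
          simp [pvGroupStep, h, hc']
        rw [hstep]
        have hinv' : ∀ k, (d.modify c' [] (fun l => l ++ [(List.lookup "tag" t).getD ""])).contains k
            = pvInitCats.contains k := by
          intro k
          rw [PySem.Dict.contains_modify, ← hinv k]
          by_cases hk : k = c'
          · subst hk; simp [hc']
          · simp [hk]
        have hcc : (d.modify c' [] (fun l => l ++ [(List.lookup "tag" t).getD ""])).contains c = true := by
          rw [hinv' c, ← hinv c]; exact hc
        rw [ih _ hcc hinv']
        rw [PySem.Dict.getD_modify]
        by_cases hce : c = c'
        · subst hce
          simp [pvCatTags, h]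
        · have : ¬ (List.lookup "category" t == some c) = true := by
            simp [h]; exact fun e => hce e.symm
          simp [hce, pvCatTags, h, Ne.symm hce]
      · have hstep : pvGroupStep d t = d := by simp [pvGroupStep, h, hc']
        rw [hstep, ih d hc hinv]
        have hne : c' ≠ c := fun e => hc' (e ▸ hc)
        simp [pvCatTags, h, hne]

lemma pv_append_ite (p : List String) (b : Bool) (x : String) :
    (if b then p ++ [x] else p) = p ++ (if b then [x] else []) := by
  cases b <;> simp

lemma pv_initCats_inv : ∀ k, pvInitCats.contains k = pvInitCats.contains k := fun _ => rfl

lemma pv_group_cat (tags : List (List (String × String))) (c : String)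
    (hc : pvInitCats.contains c = true) (h0 : pvInitCats.getD c [] = []) :
    (tags.foldl pvGroupStep pvInitCats).getD c [] = pvCatTags tags c := by
  rw [pv_group_getD c tags pvInitCats hc pv_initCats_inv, h0, List.nil_append]

-- ===== VERDICT (by name: the statement is the Claim_ definition above) =====
theorem generate_environment_summary_py_spec : Claim_equal_generate_environment_summary_py := by
  intro tags gem _ _
  unfold Spec_generate_environment_summary_py
  unfold generate_environment_summary_py generate_environment_summary_py_alt
  by_cases hg : (gem != "" && decide (20 < PySem.Str.len gem)) = true
  · rw [if_pos hg, if_pos hg]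
  · rw [if_neg hg, if_neg hg]
    simp only [pv_group_cat tags "location" (by decide) (by decide),
               pv_group_cat tags "lighting" (by decide) (by decide),
               pv_group_cat tags "weather" (by decide) (by decide),
               pv_group_cat tags "time-of-day" (by decide) (by decide),
               pv_append_ite, List.nil_append, List.append_assoc]
    by_cases h1 : pvCatTags tags "location" = [] <;>
      by_cases h2 : pvCatTags tags "lighting" = [] <;>
        by_cases h3 : pvCatTags tags "weather" = [] <;>
          by_cases h4 : pvCatTags tags "time-of-day" = [] <;>
            simp [h1, h2, h3, h4]
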